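-- pv_equiv track=rewrite | github.com/DaveTheGreat69/highschool-planning-optimization | src/inputs_loader.py | resolve_completed_courses
-- ===== SOURCE A (Python) =====
-- def resolve_completed_courses(catalog, completed_raw):
--     """
--     Map user-provided completed course strings to exact catalog titles when possible.
--     Example: "Spanish 2" -> "Spanish II (P)" (exact name from CSV)
--     """
--     resolved = set()
--
--     for item in completed_raw:
--         s = str(item).strip().lower()
--
--         # normalize common patterns
--         s = s.replace("spanish 1", "spanish i")
--         s = s.replace("spanish 2", "spanish ii")
--         s = s.replace("spanish 3", "spanish iii")
--         s = s.replace("spanish 4", "spanish iv")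
--
--         best = None
--         for title in catalog.keys():
--             t = title.lower()
--             if s == t:
--                 best = title
--                 break
--             if s in t:
--                 best = title
--
--         resolved.add(best if best else item)
--
--     return resolved
-- ===== SOURCE B (Python) =====
-- def _normalize(item):
--     s = str(item).strip().lower()
--     s = s.replace("spanish 1", "spanish i")
--     s = s.replace("spanish 2", "spanish ii")
--     s = s.replace("spanish 3", "spanish iii")
--     s = s.replace("spanish 4", "spanish iv")
--     return s
--
--
-- def resolve_completed_courses(catalog, completed_raw):
--     # Loop interchange: sweep the catalog ONCE (outer), updating a per-item
--     # (best, exact) state vector (inner), instead of scanning the catalog per item.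
--     norms = [_normalize(item) for item in completed_raw]
--     states = [(None, False)] * len(norms)
--     for title in catalog:
--         t = title.lower()
--         states = [
--             st if st[1]
--             else ((title, True) if s == t
--                   else ((title, False) if s in t else st))
--             for s, st in zip(norms, states)
--         ]
--     resolved = set()
--     for (best, _), item in zip(states, completed_raw):
--         resolved.add(best if best else item)
--     return resolved
-- ===== Notes on version B (the rewrite author's own statement) =====
-- stated objective: alternative
-- what changed: B interchanges the loops: it normalizes all raw items up front, then sweeps the catalog once (outer loop), updating a per-item (best, exact) state vector, so each item is a column of a single catalog pass instead of A's per-item scan with break-on-exact; first-exact wins via the exact flag, last-substring wins via overwrite.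
import Mathlib
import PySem

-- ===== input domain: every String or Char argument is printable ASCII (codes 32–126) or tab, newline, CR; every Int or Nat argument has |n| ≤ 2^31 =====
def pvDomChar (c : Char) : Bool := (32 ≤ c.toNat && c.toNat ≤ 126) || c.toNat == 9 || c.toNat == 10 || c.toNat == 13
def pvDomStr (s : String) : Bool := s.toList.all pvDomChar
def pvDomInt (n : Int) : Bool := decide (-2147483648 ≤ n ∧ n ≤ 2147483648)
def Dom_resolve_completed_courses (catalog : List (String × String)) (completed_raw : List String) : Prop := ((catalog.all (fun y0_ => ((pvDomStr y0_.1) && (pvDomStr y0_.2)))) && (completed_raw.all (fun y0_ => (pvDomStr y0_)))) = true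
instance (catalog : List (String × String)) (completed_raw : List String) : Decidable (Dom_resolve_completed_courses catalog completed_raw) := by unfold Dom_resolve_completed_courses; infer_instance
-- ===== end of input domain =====

-- B interchanges the loops: one normalization pass over the items, then a single catalog sweep
-- updating a per-item (best, exact) state vector, instead of A's per-item catalog scan.

-- ===== PORT A =====
-- s = item.strip().lower(); the four "spanish n" replacements
def pvNormA (item : String) : String :=
  let s := PySem.Str.lower (PySem.Str.strip item)
  let s := PySem.Str.replace s "spanish 1" "spanish i"
  let s := PySem.Str.replace s "spanish 2" "spanish ii"
  let s := PySem.Str.replace s "spanish 3" "spanish iii"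
  let s := PySem.Str.replace s "spanish 4" "spanish iv"
  s

-- A's inner loop: break on exact match, otherwise remember the last substring match
def pvLoopA (s : String) : Option String → List String → Option String
  | best, [] => best
  | best, title :: rest =>
    let t := PySem.Str.lower title
    if s = t then some title
    else pvLoopA s (if PySem.Str.isIn s t then some title else best) rest

def resolve_completed_courses (catalog : List (String × String)) (completed_raw : List String) : List String :=
  let ks := (PySem.Dict.ofList catalog).keys
  completed_raw.foldl (fun resolved item =>
    let s := pvNormA item
    let best := pvLoopA s none ks
    PySem.Set.add resolved (match best with
      | some b => if b = "" then item else b    -- `best if best else item`: "" is falsy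
      | none => item)) PySem.Set.empty

-- ===== PORT B =====
def pvNormalize (item : String) : String :=
  let s := PySem.Str.lower (PySem.Str.strip item)
  let s := PySem.Str.replace s "spanish 1" "spanish i"
  let s := PySem.Str.replace s "spanish 2" "spanish ii"
  let s := PySem.Str.replace s "spanish 3" "spanish iii"
  let s := PySem.Str.replace s "spanish 4" "spanish iv"
  s

def resolve_completed_courses_alt (catalog : List (String × String)) (completed_raw : List String) : List String :=
  let ks := (PySem.Dict.ofList catalog).keys
  let norms := completed_raw.map pvNormalize
  -- one catalog sweep updating a per-item (best, exact) state vector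
  let states := ks.foldl (fun states title =>
      let t := PySem.Str.lower title
      (norms.zip states).map (fun p =>
        if p.2.2 then p.2
        else if p.1 = t then (some title, true)
        else if PySem.Str.isIn p.1 t then (some title, false)
        else p.2))
    (List.replicate norms.length ((none : Option String), false))
  (states.zip completed_raw).foldl (fun resolved p =>
      PySem.Set.add resolved (match p.1.1 with
        | some b => if b = "" then p.2 else b
        | none => p.2)) PySem.Set.empty

-- ===== PRECONDITION & SPEC =====
def Spec_resolve_completed_courses (catalog : List (String × String)) (completed_raw : List String) (out : List String) : Prop := out = resolve_completed_courses_alt catalog completed_raw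
instance (catalog : List (String × String)) (completed_raw : List String) (out : List String) : Decidable (Spec_resolve_completed_courses catalog completed_raw out) := by unfold Spec_resolve_completed_courses; infer_instance

-- ===== CLAIM =====
def Claim_equal_resolve_completed_courses : Prop := ∀ (catalog : List (String × String)) (completed_raw : List String), Dom_resolve_completed_courses catalog completed_raw → Spec_resolve_completed_courses catalog completed_raw (resolve_completed_courses catalog completed_raw)

-- ===== LEMMAS AND PROOFS =====

-- per-item state machine (the column of B's sweep for one normalized item s)
def pvStM (s : String) (st : Option String × Bool) (title : String) : Option String × Bool :=
  if st.2 then st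
  else if s = PySem.Str.lower title then (some title, true)
  else if PySem.Str.isIn s (PySem.Str.lower title) then (some title, false)
  else st

-- zip a list with its own image under h
theorem zip_map_self {α β : Type} (h : α → β) (l : List α) :
    l.zip (l.map h) = l.map (fun x => (x, h x)) := by
  induction l with
  | nil => rfl
  | cons x xs ih => simp [ih]

-- B's vector sweep = per-item fold, columnwise
theorem sweep_eq_map (ks : List String) (norms : List String)
    (h : String → Option String × Bool) :
    ks.foldl (fun states title =>
        (norms.zip states).map (fun p =>
          if p.2.2 then p.2
          else if p.1 = PySem.Str.lower title then (some title, true)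
          else if PySem.Str.isIn p.1 (PySem.Str.lower title) then (some title, false)
          else p.2))
      (norms.map h)
      = norms.map (fun s => ks.foldl (pvStM s) (h s)) := by
  induction ks generalizing h with
  | nil => rfl
  | cons title ts ih =>
    simp only [List.foldl_cons]
    rw [zip_map_self, List.map_map]
    have := ih (fun s => pvStM s (h s) title)
    simpa [Function.comp, pvStM] using this

-- exact flag absorbs the rest of the sweep
theorem pvStM_true (s : String) (b : Option String) (ks : List String) :
    ks.foldl (pvStM s) (b, true) = (b, true) := by
  induction ks with
  | nil => rfl
  | cons t ts ih => simpa [pvStM] using ih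

-- A's inner loop = first component of the per-item state machine
theorem pvLoopA_eq_stM (s : String) (ks : List String) (b : Option String) :
    pvLoopA s b ks = (ks.foldl (pvStM s) (b, false)).1 := by
  induction ks generalizing b with
  | nil => rfl
  | cons t ts ih =>
    simp only [pvLoopA, List.foldl_cons, pvStM]
    by_cases h : s = PySem.Str.lower t
    · simp [h, pvStM_true]
    · simp only [if_neg h, ih]
      congr 1
      split <;> rfl

theorem replicate_eq_map_const {α β : Type} (l : List α) (c : β) :
    List.replicate l.length c = l.map (fun _ => c) := by
  induction l with
  | nil => rfl
  | cons a t ih => rw [List.length_cons, List.replicate_succ, List.map_cons, ih]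

-- folding over (map f l).zip l = folding over l with the composed body
theorem foldl_zip_map {α β γ : Type} (f : α → β) (l : List α)
    (g : γ → β × α → γ) (acc : γ) :
    ((l.map f).zip l).foldl g acc = l.foldl (fun a x => g a (f x, x)) acc := by
  induction l generalizing acc with
  | nil => rfl
  | cons x xs ih => simp [ih]

-- ===== VERDICT =====
theorem resolve_completed_courses_spec : Claim_equal_resolve_completed_courses := by
  intro catalog completed_raw _
  unfold Spec_resolve_completed_courses
  simp only [resolve_completed_courses, resolve_completed_courses_alt]
  have hrep : List.replicate (List.map pvNormalize completed_raw).length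
        ((none : Option String), false)
      = List.map (fun _ => ((none : Option String), false))
          (List.map pvNormalize completed_raw) := replicate_eq_map_const _ _
  rw [hrep]
  rw [sweep_eq_map ((PySem.Dict.ofList catalog).keys) (List.map pvNormalize completed_raw)
        (fun _ => ((none : Option String), false))]
  rw [List.map_map, foldl_zip_map]
  congr 1
  funext acc x
  simp only [Function.comp]
  rw [show pvNormalize = pvNormA from rfl, pvLoopA_eq_stM]
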